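-- pv_equiv track=rewrite | github.com/BrianComposer/TransFolk | transfolk_preprocesing/abc_to_musicxml.py | _split_abc_tunes
-- ===== SOURCE A (Python) =====
-- from typing import List, Tuple
--
-- def _split_abc_tunes(abc_text: str) -> List[str]:
--     """
--     Divide el contenido completo de un archivo ABC en tunes individuales.
--     Cada tune suele empezar por una línea 'X:'.
--     """
--     lines = abc_text.splitlines()
--     tunes: List[List[str]] = []
--     current_tune: List[str] = []
--
--     for line in lines:
--         if line.startswith("X:"):
--             if current_tune:
--                 tunes.append(current_tune)
--             current_tune = [line]
--         else:
--             if current_tune: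
--                 current_tune.append(line)
--
--     if current_tune:
--         tunes.append(current_tune)
--
--     return [
--         "\n".join(tune).strip() + "\n"
--         for tune in tunes
--         if any(line.strip() for line in tune)
--     ]
-- ===== SOURCE B (Python) =====
-- from typing import List
--
--
-- def _split_abc_tunes(abc_text: str) -> List[str]:
--     """Index-based re-implementation: collect the positions of the 'X:' header
--     lines, then slice the line list between consecutive headers."""
--     lines = abc_text.splitlines()
--     idxs = [i for i, line in enumerate(lines) if line.startswith("X:")]
--     out: List[str] = []
--     for i, j in zip(idxs, idxs[1:] + [len(lines)]):
--         block = lines[i:j]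
--         if any(line.strip() for line in block):
--             out.append("\n".join(block).strip() + "\n")
--     return out
-- ===== Notes on version B (the rewrite author's own statement) =====
-- stated objective: alternative
-- what changed: Replaces A's single-pass accumulator state machine (current_tune list grown line by line, flushed on each 'X:' header) by a boundary-index decomposition: one pass collects the indices of 'X:' lines, then each tune is a slice of the line list between consecutive boundary indices.
import Mathlib
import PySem

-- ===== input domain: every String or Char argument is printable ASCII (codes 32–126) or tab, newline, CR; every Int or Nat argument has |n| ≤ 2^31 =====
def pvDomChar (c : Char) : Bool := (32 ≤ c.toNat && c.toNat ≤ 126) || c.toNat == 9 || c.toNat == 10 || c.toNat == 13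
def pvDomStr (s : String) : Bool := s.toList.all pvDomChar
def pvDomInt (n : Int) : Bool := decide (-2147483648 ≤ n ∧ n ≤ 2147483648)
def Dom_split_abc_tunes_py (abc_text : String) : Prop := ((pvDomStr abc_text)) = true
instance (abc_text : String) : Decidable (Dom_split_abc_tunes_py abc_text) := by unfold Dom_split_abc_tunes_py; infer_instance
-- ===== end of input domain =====

-- B replaces A's accumulator state machine by boundary-index slicing (same O(n) cost, different decomposition); proved equal on all inputs.


-- ===== PORT A =====
-- shared helpers: these three expressions appear verbatim in both Python versions
def pvIsX (l : String) : Bool := PySem.Str.startswith l "X:"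
def pvKeep (t : List String) : Bool := t.any (fun l => PySem.Str.strip l != "")
def pvFmt (t : List String) : String := PySem.Str.strip (PySem.Str.join "\n" t) ++ "\n"

def pvStepA (s : List (List String) × List String) (line : String) :
    List (List String) × List String :=
  if pvIsX line then
    (if s.2 ≠ [] then s.1 ++ [s.2] else s.1, [line])
  else
    (s.1, if s.2 ≠ [] then s.2 ++ [line] else s.2)

def split_abc_tunes_py (abc_text : String) : List String :=
  let lines := PySem.Str.splitlines abc_text
  let st := lines.foldl pvStepA ([], [])
  let tunes := if st.2 ≠ [] then st.1 ++ [st.2] else st.1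
  (tunes.filter pvKeep).map pvFmt

-- ===== PORT B =====
def split_abc_tunes_py_alt (abc_text : String) : List String :=
  let lines := PySem.Str.splitlines abc_text
  let idxs := ((PySem.List.enumerate lines 0).filter (fun p => pvIsX p.2)).map (·.1)
  (idxs.zip (idxs.drop 1 ++ [(lines.length : Int)])).foldl
    (fun out p =>
      let block := PySem.List.slice lines (some p.1) (some p.2)
      if pvKeep block then out ++ [pvFmt block] else out) []

-- ===== PRECONDITION & SPEC =====
def Spec_split_abc_tunes_py (abc_text : String) (out : List String) : Prop := out = split_abc_tunes_py_alt abc_text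
instance (abc_text : String) (out : List String) : Decidable (Spec_split_abc_tunes_py abc_text out) := by unfold Spec_split_abc_tunes_py; infer_instance

-- ===== CLAIM (what is proved, stated in full; the proofs are below) =====
def Claim_equal_split_abc_tunes_py : Prop := ∀ (abc_text : String), Dom_split_abc_tunes_py abc_text → Spec_split_abc_tunes_py abc_text (split_abc_tunes_py abc_text)

-- ===== LEMMAS AND PROOFS =====

-- the common characterisation: the list of tune blocks of a line list
def rawBlocks : List String → List (List String)
  | [] => []
  | l :: ls =>
    if pvIsX l then
      (l :: ls.takeWhile (fun x => !pvIsX x)) :: rawBlocks (ls.dropWhile (fun x => !pvIsX x))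
    else rawBlocks ls
termination_by ls => ls.length
decreasing_by
  · have := List.length_dropWhile_le (fun x => !pvIsX x) ls; simp; omega
  · simp

-- A side ---------------------------------------------------------------
def pvFinishA (s : List (List String) × List String) : List (List String) :=
  if s.2 ≠ [] then s.1 ++ [s.2] else s.1

theorem foldA_in_tune (ls : List String) : ∀ (tunes : List (List String)) (cur : List String),
    cur ≠ [] →
    pvFinishA (ls.foldl pvStepA (tunes, cur)) =
      tunes ++ (cur ++ ls.takeWhile (fun x => !pvIsX x)) ::
        rawBlocks (ls.dropWhile (fun x => !pvIsX x)) := by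
  induction ls with
  | nil => intro tunes cur h; simp [pvFinishA, h, rawBlocks]
  | cons x xs ih =>
    intro tunes cur h
    by_cases hx : pvIsX x = true
    · rw [List.foldl_cons, show pvStepA (tunes, cur) x = (tunes ++ [cur], [x]) from by
        simp [pvStepA, hx, h]]
      rw [ih (tunes ++ [cur]) [x] (by simp)]
      simp [rawBlocks, hx]
    · rw [List.foldl_cons, show pvStepA (tunes, cur) x = (tunes, cur ++ [x]) from by
        simp [pvStepA, hx, h]]
      rw [ih tunes (cur ++ [x]) (by simp)]
      simp [hx]

theorem foldA_pre (ls : List String) : ∀ (tunes : List (List String)),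
    pvFinishA (ls.foldl pvStepA (tunes, [])) = tunes ++ rawBlocks ls := by
  induction ls with
  | nil => intro tunes; simp [pvFinishA, rawBlocks]
  | cons x xs ih =>
    intro tunes
    by_cases hx : pvIsX x = true
    · rw [List.foldl_cons, show pvStepA (tunes, []) x = (tunes, [x]) from by
        simp [pvStepA, hx]]
      rw [foldA_in_tune xs tunes [x] (by simp)]
      simp [rawBlocks, hx]
    · rw [List.foldl_cons, show pvStepA (tunes, []) x = (tunes, []) from by
        simp [pvStepA, hx]]
      rw [ih tunes, rawBlocks]
      simp [hx]

-- B side ---------------------------------------------------------------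
def natIdxs : List String → List Nat
  | [] => []
  | x :: xs => (if pvIsX x then [0] else []) ++ (natIdxs xs).map (· + 1)

theorem enum_shift {α : Type} (xs : List α) (s : Int) :
    PySem.List.enumerate xs (s + 1) = (PySem.List.enumerate xs s).map (fun p => (p.1 + 1, p.2)) := by
  induction xs generalizing s with
  | nil => simp [PySem.List.enumerate_nil]
  | cons x xs ih =>
    rw [PySem.List.enumerate_cons, PySem.List.enumerate_cons, List.map_cons,
      show s + 1 + 1 = (s + 1) + 1 from by ring, ih (s + 1)]

theorem filtmap_shift (l : List (Int × String)) :
    ((l.map (fun p => (p.1 + 1, p.2))).filter (fun p => pvIsX p.2)).map (fun p => p.1) =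
      ((l.filter (fun p => pvIsX p.2)).map (fun p => p.1)).map (· + 1) := by
  rw [List.filter_map, List.map_map, List.map_map]; rfl

theorem idxs_eq_natIdxs (ls : List String) :
    ((PySem.List.enumerate ls 0).filter (fun p => pvIsX p.2)).map (fun p => p.1) =
      (natIdxs ls).map (Nat.cast : Nat → Int) := by
  induction ls with
  | nil => simp [PySem.List.enumerate_nil, natIdxs]
  | cons x xs ih =>
    rw [PySem.List.enumerate_cons, enum_shift, natIdxs, List.filter_cons]
    by_cases hx : pvIsX x = true
    · simp only [hx, if_pos, List.map_cons, filtmap_shift, ih, List.map_map,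
        List.cons_append, List.nil_append]
      refine List.cons_eq_cons.mpr ⟨by simp, ?_⟩
      apply List.map_congr_left; intro n _; simp
    · simp only [hx, Bool.false_eq_true, if_false, filtmap_shift, ih, List.map_map,
        List.nil_append]
      apply List.map_congr_left; intro n _; simp

-- slices between consecutive boundary indices, at the Nat level
def blocksOf (ls : List String) : List (List String) :=
  ((natIdxs ls).zip ((natIdxs ls).drop 1 ++ [ls.length])).map
    (fun p => (ls.drop p.1).take (p.2 - p.1))

theorem natIdxs_nil_forall (xs : List String) (h : natIdxs xs = []) :
    ∀ x ∈ xs, pvIsX x = false := by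
  induction xs with
  | nil => simp
  | cons x xs ih =>
    rw [natIdxs] at h
    by_cases hx : pvIsX x = true
    · simp [hx] at h
    · simp only [hx, Bool.false_eq_true, if_false, List.nil_append, List.map_eq_nil_iff] at h
      intro y hy
      rcases List.mem_cons.mp hy with rfl | hy'
      · simpa using hx
      · exact ih h y hy'

theorem natIdxs_head_take (xs : List String) : ∀ (y : Nat) (t : List Nat),
    natIdxs xs = y :: t → xs.take y = xs.takeWhile (fun x => !pvIsX x) := by
  induction xs with
  | nil => intro y t h; simp [natIdxs] at h
  | cons x xs ih =>
    intro y t h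
    rw [natIdxs] at h
    by_cases hx : pvIsX x = true
    · simp only [hx, if_pos, List.cons_append, List.nil_append, List.cons.injEq] at h
      obtain ⟨rfl, _⟩ := h
      simp [hx]
    · simp only [hx, Bool.false_eq_true, if_false, List.nil_append] at h
      cases hys : natIdxs xs with
      | nil => rw [hys] at h; simp at h
      | cons y' t' =>
        rw [hys] at h; simp only [List.map_cons, List.cons.injEq] at h
        obtain ⟨rfl, _⟩ := h
        simp only [List.take_succ_cons, List.takeWhile_cons, hx]
        simp [ih y' t' hys]

theorem rawBlocks_dropWhile (ls : List String) :
    rawBlocks (ls.dropWhile (fun x => !pvIsX x)) = rawBlocks ls := by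
  induction ls with
  | nil => simp
  | cons x xs ih =>
    by_cases hx : pvIsX x = true
    · simp [hx]
    · rw [List.dropWhile_cons]
      simp only [hx, Bool.not_false, if_pos]
      rw [ih, rawBlocks]
      simp [hx]

theorem blocks_shift (x : String) (xs : List String) :
    ((((natIdxs xs).map (· + 1)).zip (((natIdxs xs).map (· + 1)).drop 1 ++ [xs.length + 1])).map
        (fun p => ((x :: xs).drop p.1).take (p.2 - p.1))) = blocksOf xs := by
  rw [blocksOf, ← List.map_drop, show [xs.length + 1] = List.map (· + 1) [xs.length] from rfl,
    ← List.map_append, List.zip_map, List.map_map]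
  apply List.map_congr_left
  intro p _
  simp [Nat.succ_sub_succ]

theorem blocksOf_eq_rawBlocks (ls : List String) : blocksOf ls = rawBlocks ls := by
  induction ls with
  | nil => simp [blocksOf, natIdxs, rawBlocks]
  | cons x xs ih =>
    by_cases hx : pvIsX x = true
    · rw [blocksOf, natIdxs]
      simp only [hx, if_pos, List.cons_append, List.nil_append]
      rw [rawBlocks]
      simp only [hx, if_pos]
      cases hys : natIdxs xs with
      | nil =>
        simp only [List.map_nil, List.drop_succ_cons, List.drop_nil, List.nil_append,
          List.zip_cons_cons, List.zip_nil_right, List.map_cons, List.map_nil]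
        have hall := natIdxs_nil_forall xs hys
        have htw : xs.takeWhile (fun x => !pvIsX x) = xs :=
          List.takeWhile_eq_self_iff.mpr (by intro a ha; simp [hall a ha])
        have hdw : xs.dropWhile (fun x => !pvIsX x) = [] :=
          List.dropWhile_eq_nil_iff.mpr (by intro a ha; simp [hall a ha])
        rw [htw, hdw]
        simp [rawBlocks]
      | cons y t =>
        simp only [List.map_cons, List.drop_succ_cons, List.drop_zero, List.cons_append,
          List.zip_cons_cons, List.map_cons, List.length_cons]
        congr 1
        · simp only [Nat.sub_zero, List.take_succ_cons, List.cons.injEq, true_and]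
          exact natIdxs_head_take xs y t hys
        · rw [show ((y + 1) :: List.map (· + 1) t) = (natIdxs xs).map (· + 1) from by
              simp [hys],
            show (List.map (· + 1) t ++ [xs.length + 1]) =
                ((natIdxs xs).map (· + 1)).drop 1 ++ [xs.length + 1] from by simp [hys]]
          exact (blocks_shift x xs).trans (ih.trans (rawBlocks_dropWhile xs).symm)
    · rw [blocksOf, natIdxs]
      simp only [hx, Bool.false_eq_true, if_false, List.nil_append, List.length_cons]
      rw [blocks_shift, ih, rawBlocks]
      simp [hx]

-- bridging B's Int-level slices to blocksOf
theorem mapSlice_eq_blocksOf (ls : List String) :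
    ((((PySem.List.enumerate ls 0).filter (fun p => pvIsX p.2)).map (fun p => p.1)).zip
        ((((PySem.List.enumerate ls 0).filter (fun p => pvIsX p.2)).map (fun p => p.1)).drop 1 ++
          [(ls.length : Int)])).map
      (fun p => PySem.List.slice ls (some p.1) (some p.2)) = blocksOf ls := by
  rw [idxs_eq_natIdxs, ← List.map_drop,
    show [(ls.length : Int)] = List.map (Nat.cast : Nat → Int) [ls.length] from rfl,
    ← List.map_append, List.zip_map, List.map_map, blocksOf]
  apply List.map_congr_left
  intro p _
  simp [PySem.List.slice_natCast]

theorem foldB_eq (ls : List String) (l : List (Int × Int)) (acc : List String) :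
    l.foldl (fun out p =>
        if pvKeep (PySem.List.slice ls (some p.1) (some p.2)) then
          out ++ [pvFmt (PySem.List.slice ls (some p.1) (some p.2))]
        else out) acc =
      acc ++ ((l.map (fun p => PySem.List.slice ls (some p.1) (some p.2))).filter pvKeep).map pvFmt := by
  induction l generalizing acc with
  | nil => simp
  | cons q l ih =>
    rw [List.foldl_cons, ih]
    by_cases h : pvKeep (PySem.List.slice ls (some q.1) (some q.2)) = true <;> simp [h]

-- ===== VERDICT (by name: the statement is the Claim_ definition above) =====
theorem split_abc_tunes_py_spec : Claim_equal_split_abc_tunes_py := by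
  intro abc_text _
  unfold Spec_split_abc_tunes_py split_abc_tunes_py split_abc_tunes_py_alt
  generalize PySem.Str.splitlines abc_text = ls
  show ((pvFinishA (ls.foldl pvStepA ([], []))).filter pvKeep).map pvFmt = _
  rw [foldA_pre ls [], List.nil_append]
  show _ = ((((PySem.List.enumerate ls 0).filter (fun p => pvIsX p.2)).map (fun p => p.1)).zip
      ((((PySem.List.enumerate ls 0).filter (fun p => pvIsX p.2)).map (fun p => p.1)).drop 1 ++
        [(ls.length : Int)])).foldl
      (fun out p =>
        if pvKeep (PySem.List.slice ls (some p.1) (some p.2)) then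
          out ++ [pvFmt (PySem.List.slice ls (some p.1) (some p.2))]
        else out) []
  rw [foldB_eq, List.nil_append, mapSlice_eq_blocksOf, blocksOf_eq_rawBlocks]
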